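-- pv_equiv track=rewrite | github.com/suryakrish31/Code_Snippets | IQZ_pattern_search.py | create_iqz_arrays
-- ===== SOURCE A (Python) =====
-- def create_iqz_arrays(byte_array):
--     i_array = []
--     q_array = []
--     z_array = []
--
--     for i in range(len(byte_array) * 8):  # Total number of bits in the byte array
--         byte_index = i // 8
--         bit_index = i % 8
--
--         byte = byte_array[byte_index]
--
--         if i % 3 == 0:
--             i_bit = (byte >> bit_index) & 0b00000001
--             i_array.append(i_bit)
--         elif i % 3 == 1:
--             q_bit = (byte >> bit_index) & 0b00000001
--             q_array.append(q_bit)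
--         else:
--             z_bit = (byte >> bit_index) & 0b00000001
--             z_array.append(z_bit)
--
--     return i_array, q_array, z_array
-- ===== SOURCE B (Python) =====
-- def create_iqz_arrays(byte_array):
--     n = len(byte_array)
--     bits = [(byte_array[i // 8] >> (i % 8)) & 1 for i in range(n * 8)]
--     return bits[0::3], bits[1::3], bits[2::3]
-- ===== Notes on version B (the rewrite author's own statement) =====
-- stated objective: simpler
-- what changed: A dispatches each bit into one of three accumulators with an i % 3 branch in one round-robin loop; B builds the flat bit list once and obtains the three outputs as the stride-3 slices bits[0::3], bits[1::3], bits[2::3].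
import Mathlib
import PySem

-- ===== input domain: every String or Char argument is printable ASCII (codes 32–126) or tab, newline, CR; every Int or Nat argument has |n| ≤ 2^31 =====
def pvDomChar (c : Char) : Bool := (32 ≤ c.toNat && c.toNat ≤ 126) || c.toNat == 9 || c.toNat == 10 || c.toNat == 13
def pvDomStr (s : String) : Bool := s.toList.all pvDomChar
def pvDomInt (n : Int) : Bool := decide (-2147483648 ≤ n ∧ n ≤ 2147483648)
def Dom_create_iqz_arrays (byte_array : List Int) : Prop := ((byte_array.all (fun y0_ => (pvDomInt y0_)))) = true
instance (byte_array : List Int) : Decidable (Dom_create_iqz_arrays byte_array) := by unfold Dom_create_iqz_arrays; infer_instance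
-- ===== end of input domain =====

-- ===== PORT A =====
-- A round-robins each bit into I/Q/Z by i % 3; this file's B instead builds the flat bit
-- list once and partitions it by stride-3 slices (objective: simpler decomposition).
def create_iqz_arrays (byte_array : List Int) : List Int × List Int × List Int :=
  (PySem.List.pyRange 0 (byte_array.length * 8) 1).foldl
    (fun (acc : List Int × List Int × List Int) i =>
      let byte_index := PySem.Int.floordiv i 8
      let bit_index := PySem.Int.mod i 8
      let byte := PySem.List.pyGetD byte_array byte_index 0   -- index always in range: i < len*8
      if PySem.Int.mod i 3 = 0 then
        (acc.1 ++ [PySem.Int.band (byte >>> bit_index.toNat) 1], acc.2.1, acc.2.2)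
      else if PySem.Int.mod i 3 = 1 then
        (acc.1, acc.2.1 ++ [PySem.Int.band (byte >>> bit_index.toNat) 1], acc.2.2)
      else
        (acc.1, acc.2.1, acc.2.2 ++ [PySem.Int.band (byte >>> bit_index.toNat) 1]))
    ([], [], [])

-- ===== PORT B =====
-- hand port of the stride slice xs[s::3] for 0 <= s: take one element, skip two
-- (exact for a nonnegative start and step 3, which is how Source B uses it)
def pvEvery3 : List Int → List Int
  | [] => []
  | x :: rest => x :: pvEvery3 (rest.drop 2)
termination_by xs => xs.length
decreasing_by simp

def create_iqz_arrays_alt (byte_array : List Int) : List Int × List Int × List Int :=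
  let n := byte_array.length
  let bits := (PySem.List.pyRange 0 (n * 8) 1).map
    (fun i => PySem.Int.band
      (PySem.List.pyGetD byte_array (PySem.Int.floordiv i 8) 0 >>> (PySem.Int.mod i 8).toNat) 1)
  (pvEvery3 bits, pvEvery3 (bits.drop 1), pvEvery3 (bits.drop 2))

-- ===== PRECONDITION & SPEC =====
def Spec_create_iqz_arrays (byte_array : List Int) (out : List Int × List Int × List Int) : Prop := out = create_iqz_arrays_alt byte_array
instance (byte_array : List Int) (out : List Int × List Int × List Int) : Decidable (Spec_create_iqz_arrays byte_array out) := by unfold Spec_create_iqz_arrays; infer_instance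

-- ===== CLAIM (what is proved, stated in full; the proofs are below) =====
def Claim_equal_create_iqz_arrays : Prop := ∀ (byte_array : List Int), Dom_create_iqz_arrays byte_array → Spec_create_iqz_arrays byte_array (create_iqz_arrays byte_array)

-- ===== LEMMAS AND PROOFS =====

lemma pvEvery3_append (M : List Int) (x : Int) :
    pvEvery3 (M ++ [x]) = if M.length % 3 = 0 then pvEvery3 M ++ [x] else pvEvery3 M := by
  induction M using pvEvery3.induct with
  | case1 => simp [pvEvery3]
  | case2 a rest ih =>
    match rest with
    | [] => simp [pvEvery3]
    | [b] => simp [pvEvery3]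
    | b :: c :: rest' =>
      have h2 : ((b :: c :: rest') ++ [x]).drop 2 = rest' ++ [x] := by simp
      simp only [List.cons_append, pvEvery3, List.drop_succ_cons, List.drop_zero] at ih ⊢
      rw [ih]
      have hlen3 : (a :: b :: c :: rest').length = rest'.length + 3 := by simp
      by_cases h : rest'.length % 3 = 0
      · rw [if_pos h, if_pos (by omega)]
      · rw [if_neg h, if_neg (by omega)]

lemma pv_loop_eq (f : Int → Int) (m : Nat) :
    (PySem.List.pyRange 0 m 1).foldl
      (fun (acc : List Int × List Int × List Int) i =>
        if PySem.Int.mod i 3 = 0 then (acc.1 ++ [f i], acc.2.1, acc.2.2)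
        else if PySem.Int.mod i 3 = 1 then (acc.1, acc.2.1 ++ [f i], acc.2.2)
        else (acc.1, acc.2.1, acc.2.2 ++ [f i]))
      ([], [], [])
    = (pvEvery3 ((PySem.List.pyRange 0 m 1).map f),
       pvEvery3 (((PySem.List.pyRange 0 m 1).map f).drop 1),
       pvEvery3 (((PySem.List.pyRange 0 m 1).map f).drop 2)) := by
  induction m with
  | zero => simp [pvEvery3]
  | succ m ih =>
    have hsz : ((m : Int) + 1) = ((m + 1 : Nat) : Int) := by push_cast; ring
    have hrange : PySem.List.pyRange 0 ((m + 1 : Nat) : Int) 1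
        = PySem.List.pyRange 0 (m : Nat) 1 ++ [(m : Int)] := by
      rw [← hsz, PySem.List.pyRange_one_succ_right (by positivity)]
    set L := (PySem.List.pyRange 0 (m : Nat) 1).map f with hL
    have hlen : L.length = m := by simp [hL, PySem.List.length_pyRange_one]
    have hmod : PySem.Int.mod (m : Int) 3 = ((m % 3 : Nat) : Int) := by
      exact_mod_cast PySem.Int.mod_natCast m 3
    rw [hrange, List.foldl_append, List.map_append, ih]
    simp only [List.foldl_cons, List.foldl_nil, List.map_cons, List.map_nil]
    rw [hmod]
    rcases Nat.lt_or_ge m 2 with hm | hm2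
    · interval_cases m <;>
        norm_num [pvEvery3, hL, PySem.List.pyRange_one, List.range_succ, PySem.Int.mod]
    · -- m ≥ 2 : all three drops commute with the append
      have hd1 : (L ++ [f m]).drop 1 = L.drop 1 ++ [f m] :=
        List.drop_append_of_le_length (by omega)
      have hd2 : (L ++ [f m]).drop 2 = L.drop 2 ++ [f m] :=
        List.drop_append_of_le_length (by omega)
      have hl1 : (L.drop 1).length % 3 = (m - 1) % 3 := by simp [hlen]
      have hl2 : (L.drop 2).length % 3 = (m - 2) % 3 := by simp [hlen]
      by_cases h0 : m % 3 = 0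
      · have e0 : ((m % 3 : Nat) : Int) = 0 := by rw [h0]; rfl
        simp only [e0]
        rw [hd1, hd2, pvEvery3_append, pvEvery3_append, pvEvery3_append, hlen, hl1, hl2]
        simp [h0, show (m-1) % 3 ≠ 0 by omega, show (m-2) % 3 ≠ 0 by omega]
        rw [hL]
      · by_cases h1 : m % 3 = 1
        · have e0 : ((m % 3 : Nat) : Int) ≠ 0 := by simp [h1]
          have e1 : ((m % 3 : Nat) : Int) = 1 := by rw [h1]; rfl
          simp only [e1]
          rw [hd1, hd2, pvEvery3_append, pvEvery3_append, pvEvery3_append, hlen, hl1, hl2]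
          simp [h0, show (m-1) % 3 = 0 by omega, show (m-2) % 3 ≠ 0 by omega]
          rw [hL]
        · have h2' : m % 3 = 2 := by omega
          have e0 : ((m % 3 : Nat) : Int) ≠ 0 := by simp [h2']
          have e1 : ((m % 3 : Nat) : Int) ≠ 1 := by simp [h2']
          simp only [if_neg e0, if_neg e1]
          rw [hd1, hd2, pvEvery3_append, pvEvery3_append, pvEvery3_append, hlen, hl1, hl2]
          simp [h0, show (m-1) % 3 ≠ 0 by omega, show (m-2) % 3 = 0 by omega]
          rw [hL]

-- ===== VERDICT (by name: the statement is the Claim_ definition above) =====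
theorem create_iqz_arrays_spec : Claim_equal_create_iqz_arrays := by
  intro byte_array _
  unfold Spec_create_iqz_arrays create_iqz_arrays create_iqz_arrays_alt
  have hc : ((byte_array.length : Int) * 8) = ((byte_array.length * 8 : Nat) : Int) := by
    push_cast; ring
  rw [hc]
  simp only [pv_loop_eq]
  rfl
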